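-- pv_equiv track=rewrite | github.com/project-greenhouse/slo-combine | dedup_athletes.py | merge_keys
-- ===== SOURCE A (Python) =====
-- def merge_keys(winner: dict, losers: list[dict]) -> dict:
--     merge_fields = ["HawkinID", "ValorID", "SprintID", "ProAgilID", "bookeo_person_id", "bookeo_customer_id"]
--     updates = {}
--     for field in merge_fields:
--         if not winner.get(field):
--             for loser in losers:
--                 if loser.get(field):
--                     updates[field] = loser[field]
--                     break
--     return updates
-- ===== SOURCE B (Python) =====
-- MERGE_FIELDS = ["HawkinID", "ValorID", "SprintID", "ProAgilID", "bookeo_person_id", "bookeo_customer_id"]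
--
-- def merge_keys(winner: dict, losers: list[dict]) -> dict:
--     # One pass over the losers builds a combined table (earliest truthy value
--     # per field wins), then a gap-filling comprehension over the fields.
--     combined = {}
--     for loser in losers:
--         for field in MERGE_FIELDS:
--             if field not in combined and loser.get(field):
--                 combined[field] = loser[field]
--     return {f: combined[f] for f in MERGE_FIELDS if not winner.get(f) and f in combined}
-- ===== Notes on version B (the rewrite author's own statement) =====
-- stated objective: alternative
-- what changed: A scans the losers list once per missing field (per-field inner loops); B first builds a combined first-truthy-value table in a single pass over the losers and then fills the winner's gaps with a comprehension over the fields.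
import Mathlib
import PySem

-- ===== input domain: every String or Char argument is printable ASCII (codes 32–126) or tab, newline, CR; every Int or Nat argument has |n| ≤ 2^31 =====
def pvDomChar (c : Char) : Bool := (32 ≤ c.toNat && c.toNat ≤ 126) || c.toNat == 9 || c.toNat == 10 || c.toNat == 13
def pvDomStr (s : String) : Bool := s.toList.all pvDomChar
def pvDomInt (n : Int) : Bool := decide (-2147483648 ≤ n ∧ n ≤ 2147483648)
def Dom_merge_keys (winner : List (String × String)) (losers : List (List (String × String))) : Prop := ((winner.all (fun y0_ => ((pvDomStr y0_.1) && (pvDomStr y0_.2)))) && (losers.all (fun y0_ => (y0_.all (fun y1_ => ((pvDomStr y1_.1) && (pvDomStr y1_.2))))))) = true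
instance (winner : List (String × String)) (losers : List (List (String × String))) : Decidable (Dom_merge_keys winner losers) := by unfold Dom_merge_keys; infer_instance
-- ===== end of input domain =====

-- B replaces A's per-field rescans of the losers by one combined-table pass plus a gap-filling pass (alternative decomposition, same cost).

-- ===== PORT A =====
-- 'not winner.get(field)' : falsy = missing key or empty string
def aFalsy (o : Option String) : Bool :=
  match o with
  | some v => v == ""
  | none => true

-- inner loop: 'for loser in losers: if loser.get(field): updates[field] = loser[field]; break'
def aFill (field : String) (losers : List (List (String × String)))
    (updates : PySem.Dict String String) : PySem.Dict String String :=
  match losers with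
  | [] => updates
  | loser :: rest =>
    match (PySem.Dict.mk loser).get? field with
    | some v => if v == "" then aFill field rest updates else updates.insert field v
    | none => aFill field rest updates

def merge_keys (winner : List (String × String)) (losers : List (List (String × String))) : List (String × String) :=
  (( ["HawkinID", "ValorID", "SprintID", "ProAgilID", "bookeo_person_id", "bookeo_customer_id"]
     |>.foldl (fun updates field =>
        if aFalsy ((PySem.Dict.mk winner).get? field) then aFill field losers updates else updates)
       PySem.Dict.empty) : PySem.Dict String String).items

-- ===== PORT B =====
def bFields : List String := ["HawkinID", "ValorID", "SprintID", "ProAgilID", "bookeo_person_id", "bookeo_customer_id"]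

-- truthy = present and non-empty
def bTruthy (o : Option String) : Bool :=
  match o with
  | some v => v != ""
  | none => false

-- single pass over losers: record the first truthy value seen for each field
def bCombine (losers : List (List (String × String))) : PySem.Dict String String :=
  losers.foldl (fun c loser =>
    bFields.foldl (fun c field =>
      if !c.contains field then
        match (PySem.Dict.mk loser).get? field with
        | some v => if v != "" then c.insert field v else c
        | none => c
      else c) c) PySem.Dict.empty

def merge_keys_alt (winner : List (String × String)) (losers : List (List (String × String))) : List (String × String) :=
  let combined := bCombine losers
  (bFields.foldl (fun out f =>
    if bTruthy ((PySem.Dict.mk winner).get? f) then out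
    else
      match combined.get? f with
      | some v => out.insert f v
      | none => out) PySem.Dict.empty).items

-- ===== PRECONDITION & SPEC =====
def Spec_merge_keys (winner : List (String × String)) (losers : List (List (String × String))) (out : List (String × String)) : Prop := out = merge_keys_alt winner losers
instance (winner : List (String × String)) (losers : List (List (String × String))) (out : List (String × String)) : Decidable (Spec_merge_keys winner losers out) := by unfold Spec_merge_keys; infer_instance

-- ===== CLAIM (what is proved, stated in full; the proofs are below) =====
def Claim_equal_merge_keys : Prop := ∀ (winner : List (String × String)) (losers : List (List (String × String))), Dom_merge_keys winner losers → Spec_merge_keys winner losers (merge_keys winner losers)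

-- ===== LEMMAS AND PROOFS =====

-- the first truthy value any loser holds for a field
def firstTruthy (f : String) : List (List (String × String)) → Option String
  | [] => none
  | l :: rest =>
    match (PySem.Dict.mk l).get? f with
    | some v => if v == "" then firstTruthy f rest else some v
    | none => firstTruthy f rest

lemma aFill_eq (f : String) (losers : List (List (String × String)))
    (u : PySem.Dict String String) :
    aFill f losers u = match firstTruthy f losers with
      | some v => u.insert f v
      | none => u := by
  induction losers with
  | nil => rfl
  | cons l rest ih =>
    simp only [aFill, firstTruthy]
    cases h : (PySem.Dict.mk l).get? f with
    | none => exact ih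
    | some v =>
      by_cases hv : v == ""
      · simp [hv, ih]
      · simp [hv]

-- one loser's truthy value for a field
def truthyOf (l : List (String × String)) (f : String) : Option String :=
  match (PySem.Dict.mk l).get? f with
  | some v => if v == "" then none else some v
  | none => none

lemma bInner_skip (fs : List String) (l : List (String × String))
    (c : PySem.Dict String String) (f : String) (hf : f ∉ fs) :
    (fs.foldl (fun c field =>
      if !c.contains field then
        match (PySem.Dict.mk l).get? field with
        | some v => if v != "" then c.insert field v else c
        | none => c
      else c) c).get? f = c.get? f := by
  induction fs generalizing c with
  | nil => rfl
  | cons g rest ih =>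
    have hne : f ≠ g := fun h => hf (h ▸ List.mem_cons_self ..)
    have hrest : f ∉ rest := fun h => hf (List.mem_cons_of_mem _ h)
    simp only [List.foldl_cons]
    rw [ih _ hrest]
    split
    · cases hg : (PySem.Dict.mk l).get? g with
      | none => simp
      | some v =>
        by_cases hv : (v != "") = true
        · simp only [if_pos hv]
          exact PySem.Dict.get?_insert_of_ne _ _ hne
        · simp only [if_neg hv]
    · rfl

lemma bInner_mem (fs : List String) (l : List (String × String))
    (c : PySem.Dict String String) (f : String) (hf : f ∈ fs) (hnd : fs.Nodup) :
    (fs.foldl (fun c field =>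
      if !c.contains field then
        match (PySem.Dict.mk l).get? field with
        | some v => if v != "" then c.insert field v else c
        | none => c
      else c) c).get? f =
      match c.get? f with
      | some w => some w
      | none => truthyOf l f := by
  induction fs generalizing c with
  | nil => cases hf
  | cons g rest ih =>
    have hnd' : rest.Nodup := (List.nodup_cons.mp hnd).2
    simp only [List.foldl_cons]
    by_cases hfg : f = g
    · subst hfg
      have hf_rest : f ∉ rest := (List.nodup_cons.mp hnd).1
      rw [bInner_skip rest l _ f hf_rest]
      cases hc : c.get? f with
      | some w =>
        have : c.contains f = true := by
          rw [PySem.Dict.contains_eq_isSome_get?, hc]; rfl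
        simp [this, hc]
      | none =>
        have : c.contains f = false := by
          rw [PySem.Dict.contains_eq_isSome_get?, hc]; rfl
        simp only [this, Bool.not_false, if_pos]
        unfold truthyOf
        cases hg : (PySem.Dict.mk l).get? f with
        | none => simp [hc]
        | some v =>
          by_cases hv : v == ""
          · simp_all
          · simp only [bne, hv, Bool.not_false, if_pos]
            simp [PySem.Dict.get?_insert_self]
    · have hf_rest : f ∈ rest := (List.mem_cons.mp hf).resolve_left hfg
      have step_eq : ∀ (c' : PySem.Dict String String),
          (if !c.contains g then
            match (PySem.Dict.mk l).get? g with
            | some v => if v != "" then c.insert g v else c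
            | none => c
          else c).get? f = c.get? f := by
        intro _
        split
        · cases hg : (PySem.Dict.mk l).get? g with
          | none => simp
          | some v =>
            by_cases hv : (v != "") = true
            · simp only [if_pos hv]
              exact PySem.Dict.get?_insert_of_ne _ _ hfg
            · simp only [if_neg hv]
        · rfl
      rw [ih _ hf_rest hnd']
      rw [step_eq c]

lemma firstTruthy_cons (f : String) (l : List (String × String))
    (rest : List (List (String × String))) :
    firstTruthy f (l :: rest) =
      match truthyOf l f with
      | some v => some v
      | none => firstTruthy f rest := by
  simp only [firstTruthy, truthyOf]
  cases hg : (PySem.Dict.mk l).get? f with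
  | none => rfl
  | some v => by_cases hv : v == "" <;> simp [hv]

lemma bCombine_aux (losers : List (List (String × String)))
    (c : PySem.Dict String String) (f : String) (hf : f ∈ bFields) :
    (losers.foldl (fun c loser =>
      bFields.foldl (fun c field =>
        if !c.contains field then
          match (PySem.Dict.mk loser).get? field with
          | some v => if v != "" then c.insert field v else c
          | none => c
        else c) c) c).get? f =
      match c.get? f with
      | some w => some w
      | none => firstTruthy f losers := by
  induction losers generalizing c with
  | nil => cases h : c.get? f <;> simp [firstTruthy, h]
  | cons l rest ih =>
    have hnd : bFields.Nodup := by decide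
    simp only [List.foldl_cons]
    rw [ih, bInner_mem bFields l c f hf hnd, firstTruthy_cons]
    cases hc : c.get? f with
    | some w => rfl
    | none => cases truthyOf l f <;> rfl

lemma bCombine_get? (losers : List (List (String × String))) (f : String)
    (hf : f ∈ bFields) :
    (bCombine losers).get? f = firstTruthy f losers := by
  unfold bCombine
  rw [bCombine_aux losers PySem.Dict.empty f hf]
  simp [PySem.Dict.get?_empty]

lemma aFalsy_bTruthy (o : Option String) : aFalsy o = !bTruthy o := by
  cases o with
  | none => rfl
  | some v => simp [aFalsy, bTruthy, bne]

-- ===== VERDICT (by name: the statement is the Claim_ definition above) =====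
theorem merge_keys_spec : Claim_equal_merge_keys := by
  intro winner losers _
  unfold Spec_merge_keys merge_keys merge_keys_alt
  congr 1
  apply PySem.List.foldl_congr_mem'
  intro f hf u
  rw [aFalsy_bTruthy, aFill_eq, bCombine_get? losers f hf]
  cases bTruthy ((PySem.Dict.mk winner).get? f) <;>
    cases firstTruthy f losers <;> rfl
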